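-- pv_equiv track=rewrite | github.com/Marksio90/SonicForge | backend/app/security/rbac.py | has_role
-- ===== SOURCE A (Python) =====
-- from enum import Enum
--
-- class Role(str, Enum):
--     """Available roles in the system."""
--
--     SUPERADMIN = "superadmin"
--     ADMIN = "admin"
--     MODERATOR = "moderator"
--     DJ = "dj"
--     USER = "user"
--     VIEWER = "viewer"
--     API_CLIENT = "api_client"
--
-- ROLE_HIERARCHY = {
--     Role.SUPERADMIN: 100,
--     Role.ADMIN: 80,
--     Role.MODERATOR: 60,
--     Role.DJ: 50,
--     Role.USER: 30,
--     Role.API_CLIENT: 20,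
--     Role.VIEWER: 10,
-- }
--
-- def has_role(user_roles: list[str], required_role: Role) -> bool:
--     """Check if user has a specific role or higher."""
--     required_level = ROLE_HIERARCHY.get(required_role, 0)
--
--     for role_str in user_roles:
--         try:
--             role = Role(role_str)
--             user_level = ROLE_HIERARCHY.get(role, 0)
--             if user_level >= required_level:
--                 return True
--         except ValueError:
--             continue
--
--     return False
-- ===== SOURCE B (Python) =====
-- from enum import Enum
--
-- class Role(str, Enum):
--     """Available roles in the system."""
--
--     SUPERADMIN = "superadmin"
--     ADMIN = "admin"
--     MODERATOR = "moderator"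
--     DJ = "dj"
--     USER = "user"
--     VIEWER = "viewer"
--     API_CLIENT = "api_client"
--
-- ROLE_HIERARCHY = {
--     Role.SUPERADMIN: 100,
--     Role.ADMIN: 80,
--     Role.MODERATOR: 60,
--     Role.DJ: 50,
--     Role.USER: 30,
--     Role.API_CLIENT: 20,
--     Role.VIEWER: 10,
-- }
--
-- def has_role(user_roles: list[str], required_role) -> bool:
--     """Check if user has a specific role or higher."""
--     required_level = ROLE_HIERARCHY.get(required_role, 0)
--     qualifying = {role.value for role, level in ROLE_HIERARCHY.items()
--                   if level >= required_level}
--     return not qualifying.isdisjoint(user_roles)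
-- ===== Notes on version B (the rewrite author's own statement) =====
-- stated objective: faster
-- what changed: Instead of scanning user roles and decoding/level-comparing each one with early return, B inverts the check: it precomputes from ROLE_HIERARCHY the set of role names whose level meets the required level, then answers by set intersection (not isdisjoint) with the user's roles, so no per-user-role Role() construction, try/except or comparison happens.
import Mathlib
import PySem

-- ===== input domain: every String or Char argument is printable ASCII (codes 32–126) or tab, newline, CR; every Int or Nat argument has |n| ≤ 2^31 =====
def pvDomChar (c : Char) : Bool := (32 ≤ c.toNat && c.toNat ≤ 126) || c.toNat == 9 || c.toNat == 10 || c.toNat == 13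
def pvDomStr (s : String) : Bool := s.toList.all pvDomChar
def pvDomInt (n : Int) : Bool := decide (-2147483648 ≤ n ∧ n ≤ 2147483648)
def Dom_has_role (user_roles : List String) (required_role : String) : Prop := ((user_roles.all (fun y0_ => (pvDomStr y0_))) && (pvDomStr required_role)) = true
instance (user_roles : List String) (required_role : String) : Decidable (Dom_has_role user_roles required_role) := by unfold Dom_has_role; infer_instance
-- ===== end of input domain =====

-- B precomputes the set of role names whose level meets the threshold, then tests set
-- intersection with the user's roles, instead of decoding and level-comparing each user role
-- (objective: alternative decomposition).

-- ===== PORT A =====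
-- ROLE_HIERARCHY as a String-keyed map: Role(s) succeeds exactly on the seven enum values,
-- and ROLE_HIERARCHY.get(Role(s)) is that role's level (none = ValueError / get default path).
def pvLevelOf (s : String) : Option Int :=
  if s = "superadmin" then some 100
  else if s = "admin" then some 80
  else if s = "moderator" then some 60
  else if s = "dj" then some 50
  else if s = "user" then some 30
  else if s = "viewer" then some 10
  else if s = "api_client" then some 20
  else none

-- the for-loop with early return and try/except-continue
def pvGoA (requiredLevel : Int) : List String -> Bool
  | [] => false
  | r :: rs =>
    match pvLevelOf r with
    | some userLevel => if userLevel >= requiredLevel then true else pvGoA requiredLevel rs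
    | none => pvGoA requiredLevel rs

def has_role (user_roles : List String) (required_role : String) : Bool :=
  let requiredLevel : Int := (pvLevelOf required_role).getD 0
  pvGoA requiredLevel user_roles

-- ===== PORT B =====
-- ROLE_HIERARCHY.items() in insertion order (role value string, level)
def pvTable : List (String × Int) :=
  [("superadmin", 100), ("admin", 80), ("moderator", 60), ("dj", 50),
   ("user", 30), ("api_client", 20), ("viewer", 10)]

def has_role_alt (user_roles : List String) (required_role : String) : Bool :=
  let requiredLevel : Int := (pvLevelOf required_role).getD 0
  -- set comprehension over items(): names of roles whose level meets the threshold
  let qualifying : List String :=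
    (pvTable.filter (fun kv => decide (kv.2 >= requiredLevel))).map Prod.fst
  -- not qualifying.isdisjoint(user_roles)
  user_roles.any (fun r => decide (r ∈ qualifying))

-- ===== PRECONDITION & SPEC =====
def Spec_has_role (user_roles : List String) (required_role : String) (out : Bool) : Prop := out = has_role_alt user_roles required_role
instance (user_roles : List String) (required_role : String) (out : Bool) : Decidable (Spec_has_role user_roles required_role out) := by unfold Spec_has_role; infer_instance

-- ===== CLAIM (what is proved, stated in full; the proofs are below) =====
def Claim_equal_has_role : Prop := ∀ (user_roles : List String) (required_role : String), Dom_has_role user_roles required_role → Spec_has_role user_roles required_role (has_role user_roles required_role)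

-- ===== LEMMAS AND PROOFS =====

-- A's scan is an `any` over the per-element test
theorem pvGoA_eq_any (L : Int) (rs : List String) :
    pvGoA L rs = rs.any (fun r => match pvLevelOf r with
                                  | some l => decide (l >= L)
                                  | none => false) := by
  induction rs with
  | nil => rfl
  | cons r rs ih =>
    simp only [pvGoA, List.any_cons]
    cases h : pvLevelOf r with
    | none => simpa using ih
    | some l =>
      by_cases hl : l >= L
      · simp [hl]
      · simp [hl, ih]

-- membership in B's qualifying set equals A's per-element test
theorem mem_qualifying (L : Int) (s : String) :
    (decide (s ∈ (pvTable.filter (fun kv => decide (kv.2 >= L))).map Prod.fst) : Bool)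
    = (match pvLevelOf s with
       | some l => decide (l >= L)
       | none => false) := by
  unfold pvLevelOf
  split_ifs with h1 h2 h3 h4 h5 h6 h7 <;>
    simp_all [pvTable, List.mem_filter, eq_comm]

-- ===== VERDICT (by name: the statement is the Claim_ definition above) =====
theorem has_role_spec : Claim_equal_has_role := by
  intro user_roles required_role _
  unfold Spec_has_role has_role has_role_alt
  rw [pvGoA_eq_any]
  congr 1
  funext r
  exact (mem_qualifying _ r).symm
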